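-- pv_equiv track=rewrite | github.com/Samaun-Islam/Rubiks_Twist_Encryption | python rubik_cipher.py | rubik_encrypt
-- ===== SOURCE A (Python) =====
-- def rubik_encrypt(plaintext, moves):
--     blocks = [plaintext[i:i+9] for i in range(0, len(plaintext), 9)]
--     result = ""
--     for block in blocks:
--         padded = block.ljust(9, 'X')
--         cube = [list(padded[i:i+3]) for i in range(0, 9, 3)]
--         for move in moves:
--             if move == 'R':
--                 cube[0][2], cube[1][2], cube[2][2] = cube[2][2], cube[0][2], cube[1][2]
--             elif move == 'L':
--                 cube[0][0], cube[1][0], cube[2][0] = cube[1][0], cube[2][0], cube[0][0]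
--             elif move == 'U':
--                 cube[0][0], cube[0][1], cube[0][2] = cube[0][2], cube[0][0], cube[0][1]
--             elif move == 'D':
--                 cube[2][0], cube[2][1], cube[2][2] = cube[2][1], cube[2][2], cube[2][0]
--         result += ''.join([''.join(row) for row in cube])
--     return result
-- ===== SOURCE B (Python) =====
-- def rubik_encrypt(plaintext, moves):
--     # Precompute the composite 9-position permutation once, then apply it to each block.
--     perm = list(range(9))
--     for move in moves:
--         if move == 'R':
--             perm[2], perm[5], perm[8] = perm[8], perm[2], perm[5]
--         elif move == 'L':
--             perm[0], perm[3], perm[6] = perm[3], perm[6], perm[0]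
--         elif move == 'U':
--             perm[0], perm[1], perm[2] = perm[2], perm[0], perm[1]
--         elif move == 'D':
--             perm[6], perm[7], perm[8] = perm[7], perm[8], perm[6]
--     out = []
--     for i in range(0, len(plaintext), 9):
--         padded = plaintext[i:i+9].ljust(9, 'X')
--         out.append(''.join(padded[j] for j in perm))
--     return ''.join(out)
-- ===== Notes on version B (the rewrite author's own statement) =====
-- stated objective: faster
-- what changed: B composes the whole move sequence into one 9-position permutation up front and applies that single permutation to each padded 9-char block, instead of replaying every move on every block's 3x3 cube as A does.
import Mathlib
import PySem

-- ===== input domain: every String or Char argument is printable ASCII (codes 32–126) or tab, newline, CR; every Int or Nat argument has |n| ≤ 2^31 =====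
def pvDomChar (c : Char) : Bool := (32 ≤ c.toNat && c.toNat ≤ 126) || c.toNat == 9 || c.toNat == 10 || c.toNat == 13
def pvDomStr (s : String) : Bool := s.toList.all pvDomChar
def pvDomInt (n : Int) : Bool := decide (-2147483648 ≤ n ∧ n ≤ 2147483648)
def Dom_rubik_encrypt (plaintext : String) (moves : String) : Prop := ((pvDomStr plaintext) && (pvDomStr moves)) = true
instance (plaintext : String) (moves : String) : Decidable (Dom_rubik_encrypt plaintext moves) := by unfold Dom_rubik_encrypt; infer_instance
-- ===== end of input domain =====

-- B precomputes the composite 9-position permutation of the move sequence once and applies it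
-- per block, instead of replaying every move on every block as A does (objective: faster).

-- ===== PORT A =====

-- cube[r][c] read / write (always in range in A's code)
def cubeGet (cube : List (List Char)) (r c : Nat) : Char :=
  (cube.getD r []).getD c 'X'

def cubeSet (cube : List (List Char)) (r c : Nat) (v : Char) : List (List Char) :=
  cube.set r ((cube.getD r []).set c v)

-- one move of A's inner loop: the simultaneous tuple assignment reads the three old
-- values first (the lets), then writes the three cells
def cubeStep (cube : List (List Char)) (move : Char) : List (List Char) :=
  if move = 'R' then
    let a := cubeGet cube 0 2; let b := cubeGet cube 1 2; let c := cubeGet cube 2 2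
    cubeSet (cubeSet (cubeSet cube 0 2 c) 1 2 a) 2 2 b
  else if move = 'L' then
    let a := cubeGet cube 0 0; let b := cubeGet cube 1 0; let c := cubeGet cube 2 0
    cubeSet (cubeSet (cubeSet cube 0 0 b) 1 0 c) 2 0 a
  else if move = 'U' then
    let a := cubeGet cube 0 0; let b := cubeGet cube 0 1; let c := cubeGet cube 0 2
    cubeSet (cubeSet (cubeSet cube 0 0 c) 0 1 a) 0 2 b
  else if move = 'D' then
    let a := cubeGet cube 2 0; let b := cubeGet cube 2 1; let c := cubeGet cube 2 2
    cubeSet (cubeSet (cubeSet cube 2 0 b) 2 1 c) 2 2 a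
  else cube

-- cube = [list(padded[i:i+3]) for i in range(0, 9, 3)]
def mkCube (padded : List Char) : List (List Char) :=
  (PySem.List.pyRange 0 9 3).map (fun i => PySem.List.slice padded (some i) (some (i + 3)))

def rubik_encrypt (plaintext : String) (moves : String) : String :=
  let s := plaintext.toList
  let blocks := (PySem.List.pyRange 0 (s.length : Int) 9).map
    (fun i => PySem.List.slice s (some i) (some (i + 9)))
  let result := blocks.foldl (fun result block =>
    let padded := block ++ List.replicate (9 - block.length) 'X'   -- block.ljust(9, 'X')
    let cube := moves.toList.foldl cubeStep (mkCube padded)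
    result ++ cube.flatten) []                                     -- ''.join(''.join(row) …)
  String.ofList result

-- ===== PORT B =====

-- one move applied to the flat 9-entry permutation list (Source B's tuple assignments)
def flatStep {α : Type} [Inhabited α] (p : List α) (move : Char) : List α :=
  if move = 'R' then
    let a := p.getD 2 default; let b := p.getD 5 default; let c := p.getD 8 default
    ((p.set 2 c).set 5 a).set 8 b
  else if move = 'L' then
    let a := p.getD 0 default; let b := p.getD 3 default; let c := p.getD 6 default
    ((p.set 0 b).set 3 c).set 6 a
  else if move = 'U' then
    let a := p.getD 0 default; let b := p.getD 1 default; let c := p.getD 2 default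
    ((p.set 0 c).set 1 a).set 2 b
  else if move = 'D' then
    let a := p.getD 6 default; let b := p.getD 7 default; let c := p.getD 8 default
    ((p.set 6 b).set 7 c).set 8 a
  else p

-- ''.join(padded[j] for j in perm)
def selJoin (padded : List Char) (perm : List Nat) : List Char :=
  perm.map (fun j => padded.getD j 'X')

def rubik_encrypt_alt (plaintext : String) (moves : String) : String :=
  let s := plaintext.toList
  let perm := moves.toList.foldl flatStep (List.range 9)
  let out := (PySem.List.pyRange 0 (s.length : Int) 9).foldl (fun out i =>
    let block := PySem.List.slice s (some i) (some (i + 9))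
    let padded := block ++ List.replicate (9 - block.length) 'X'
    out ++ selJoin padded perm) []
  String.ofList out

-- ===== PRECONDITION & SPEC =====
def Spec_rubik_encrypt (plaintext : String) (moves : String) (out : String) : Prop := out = rubik_encrypt_alt plaintext moves
instance (plaintext : String) (moves : String) (out : String) : Decidable (Spec_rubik_encrypt plaintext moves out) := by unfold Spec_rubik_encrypt; infer_instance

-- ===== CLAIM (what is proved, stated in full; the proofs are below) =====
def Claim_equal_rubik_encrypt : Prop := ∀ (plaintext : String) (moves : String), Dom_rubik_encrypt plaintext moves → Spec_rubik_encrypt plaintext moves (rubik_encrypt plaintext moves)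

-- ===== LEMMAS AND PROOFS =====

theorem exists_nine {α : Type} (s : List α) (h : s.length = 9) :
    ∃ a b c d e f g h' i, s = [a, b, c, d, e, f, g, h', i] := by
  match s, h with
  | [a, b, c, d, e, f, g, h', i], _ => exact ⟨a, b, c, d, e, f, g, h', i, rfl⟩

theorem length_flatStep {α : Type} [Inhabited α] (p : List α) (m : Char) :
    (flatStep p m).length = p.length := by
  unfold flatStep; split_ifs <;> simp

theorem length_foldl_flatStep {α : Type} [Inhabited α] (ms : List Char) (p : List α) :
    (ms.foldl flatStep p).length = p.length := by
  induction ms generalizing p with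
  | nil => rfl
  | cons m ms ih => simp [List.foldl_cons, ih, length_flatStep]

theorem cubeStep_mkCube (s : List Char) (h : s.length = 9) (m : Char) :
    cubeStep (mkCube s) m = mkCube (flatStep s m) := by
  obtain ⟨a, b, c, d, e, f, g, h', i, rfl⟩ := exists_nine s h
  unfold cubeStep flatStep
  split_ifs <;> rfl

theorem foldl_cubeStep_mkCube (ms : List Char) (s : List Char) (h : s.length = 9) :
    ms.foldl cubeStep (mkCube s) = mkCube (ms.foldl flatStep s) := by
  induction ms generalizing s with
  | nil => rfl
  | cons m ms ih =>
      simp only [List.foldl_cons, cubeStep_mkCube s h m]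
      exact ih _ (by rw [length_flatStep, h])

theorem flatten_mkCube (s : List Char) (h : s.length = 9) : (mkCube s).flatten = s := by
  obtain ⟨a, b, c, d, e, f, g, h', i, rfl⟩ := exists_nine s h
  rfl

theorem selJoin_range (s : List Char) (h : s.length = 9) : selJoin s (List.range 9) = s := by
  obtain ⟨a, b, c, d, e, f, g, h', i, rfl⟩ := exists_nine s h
  rfl

theorem flatStep_selJoin (s : List Char) (p : List Nat) (hp : p.length = 9) (m : Char) :
    flatStep (selJoin s p) m = selJoin s (flatStep p m) := by
  obtain ⟨a, b, c, d, e, f, g, h', i, rfl⟩ := exists_nine p hp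
  unfold flatStep
  split_ifs <;> rfl

theorem foldl_flatStep_selJoin (ms : List Char) (s : List Char) (p : List Nat) (hp : p.length = 9) :
    ms.foldl flatStep (selJoin s p) = selJoin s (ms.foldl flatStep p) := by
  induction ms generalizing p with
  | nil => rfl
  | cons m ms ih =>
      simp only [List.foldl_cons, flatStep_selJoin s p hp m]
      exact ih _ (by rw [length_flatStep, hp])

-- per-block agreement: replaying the moves on the padded block equals one application
-- of the composite permutation
theorem block_eq (ms : List Char) (padded : List Char) (h : padded.length = 9) :
    (ms.foldl cubeStep (mkCube padded)).flatten
      = selJoin padded (ms.foldl flatStep (List.range 9)) := by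
  rw [foldl_cubeStep_mkCube ms padded h,
      flatten_mkCube _ (by rw [length_foldl_flatStep, h]),
      ← selJoin_range padded h, foldl_flatStep_selJoin]
  · rw [selJoin_range padded h]
  · simp

theorem padded_length (s : List Char) (i : Int) (hi : 0 ≤ i) :
    (PySem.List.slice s (some i) (some (i + 9))
      ++ List.replicate (9 - (PySem.List.slice s (some i) (some (i + 9))).length) 'X').length = 9 := by
  have h1 : (PySem.List.slice s (some i) (some (i + 9))).length ≤ 9 := by
    rw [PySem.List.slice_toNat s hi (by omega)]
    have : (i + 9).toNat - i.toNat = 9 := by omega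
    rw [this]
    simp [List.length_take]
  simp [List.length_replicate]
  omega

-- ===== VERDICT (by name: the statement is the Claim_ definition above) =====
theorem rubik_encrypt_spec : Claim_equal_rubik_encrypt := by
  intro plaintext moves _
  unfold Spec_rubik_encrypt rubik_encrypt rubik_encrypt_alt
  simp only [List.foldl_map]
  congr 1
  apply PySem.List.foldl_congr_mem
  intro acc i hi
  have h0 : (0 : Int) ≤ i := by
    have := (PySem.List.mem_pyRange_iff_of_pos (a := 0) (b := (plaintext.toList.length : Int)) (s := 9) (by norm_num) i).1 hi
    exact this.1
  rw [block_eq _ _ (padded_length plaintext.toList i h0)]
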